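-- pv_equiv track=rewrite | github.com/Beka00best/python_program | game/hamming.py | advancedArray
-- ===== SOURCE A (Python) =====
-- def advancedArray(array, r):
--     j = 0
--     k = 0
--     m = len(array)
--     res = ''
--     for i in range(1, m + r + 1):
--         if(i == 2**j):
--             res = res + '0'
--             j += 1
--         else:
--             res = res + array[k]
--             k += 1
--     return res
-- ===== SOURCE B (Python) =====
-- def advancedArray(array, r):
--     # staged construction: allocate n cells, drop zeros at power-of-two slots
--     # in a logarithmic doubling pass, then fill the gaps left-to-right, then join
--     n = len(array) + r
--     if n <= 0:
--         return ''
--     cells = [None] * n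
--     p = 1
--     while p <= n:
--         cells[p - 1] = '0'
--         p *= 2
--     k = 0
--     for i in range(n):
--         if cells[i] is None:
--             cells[i] = array[k]
--             k += 1
--     return ''.join(cells)
-- ===== Notes on version B (the rewrite author's own statement) =====
-- stated objective: alternative
-- what changed: replaces A's single stateful pass (counters j,k with repeated string concatenation) by staged construction: preallocate n cells, place zeros at power-of-two slots with a logarithmic doubling loop, then fill the remaining gaps from the input in a second pass and join
import Mathlib
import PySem

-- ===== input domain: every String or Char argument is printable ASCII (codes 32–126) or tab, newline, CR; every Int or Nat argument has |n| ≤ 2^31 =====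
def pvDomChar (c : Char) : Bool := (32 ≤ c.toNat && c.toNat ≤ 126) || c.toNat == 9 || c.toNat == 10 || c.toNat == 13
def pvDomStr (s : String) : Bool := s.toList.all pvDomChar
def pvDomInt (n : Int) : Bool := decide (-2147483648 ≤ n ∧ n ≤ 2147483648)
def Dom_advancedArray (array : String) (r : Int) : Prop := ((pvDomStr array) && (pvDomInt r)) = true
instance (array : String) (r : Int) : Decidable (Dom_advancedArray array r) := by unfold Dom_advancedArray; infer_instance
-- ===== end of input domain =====

-- B replaces A's single stateful accumulating pass by staged construction: preallocate n cells,
-- drop '0' at power-of-two slots in a doubling loop, fill the gaps from the input, then join.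


-- ===== PORT A =====
-- one loop step of A: state (j, k, res); array[k] raises IndexError when out of range —
-- such inputs are outside Pre_advancedArray, the port uses a default ' ' there
def aStep (array : String) (s : Int × Int × List Char) (i : Int) : Int × Int × List Char :=
  if i = 2 ^ s.1.toNat then (s.1 + 1, s.2.1, s.2.2 ++ ['0'])
  else (s.1, s.2.1 + 1, s.2.2 ++ [(PySem.Str.pyGet? array s.2.1).getD ' '])

def advancedArray (array : String) (r : Int) : String :=
  String.ofList ((PySem.List.pyRange 1 (PySem.Str.len array + r + 1) 1).foldl (aStep array) (0, 0, [])).2.2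

-- ===== PORT B =====
-- B's doubling loop 'p = 1; while p <= n: cells[p-1] = "0"; p *= 2' (0 < p only for termination;
-- every call has p ≥ 1)
def placeZeros (n : Nat) (cells : List (Option Char)) (p : Nat) : List (Option Char) :=
  if h : 0 < p ∧ p ≤ n then placeZeros n (cells.set (p - 1) (some '0')) (p * 2)
  else cells
termination_by n + 1 - p
decreasing_by omega

-- B's fill pass: 'for i in range(n): if cells[i] is None: cells[i] = array[k]; k += 1';
-- array[k] raises IndexError out of range — outside Pre_advancedArray, default ' ' here
def fillCells (array : String) (k : Int) : List (Option Char) → List (Option Char)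
  | [] => []
  | some c :: rest => some c :: fillCells array k rest
  | none :: rest => some ((PySem.Str.pyGet? array k).getD ' ') :: fillCells array (k + 1) rest

-- B's final ''.join(cells): every cell is a single char by then (' ' default never reached)
def joinCells (cells : List (Option Char)) : List Char := cells.map (fun o => o.getD ' ')

def advancedArray_alt (array : String) (r : Int) : String :=
  let n : Int := PySem.Str.len array + r
  if n ≤ 0 then ""
  else String.ofList (joinCells (fillCells array 0 (placeZeros n.toNat (List.replicate n.toNat none) 1)))

-- ===== PRECONDITION & SPEC =====
-- A raises IndexError exactly when the loop needs more than len(array) characters, i.e. when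
-- n = len(array)+r is positive and n minus the number of powers of two ≤ n (= bit length of n)
-- exceeds len(array); Pre_ excludes exactly those raising inputs.
def Pre_advancedArray (array : String) (r : Int) : Prop :=
  PySem.Str.len array + r ≤ 0 ∨
    PySem.Str.len array + r - (Nat.size (PySem.Str.len array + r).toNat : Int) ≤ PySem.Str.len array
instance (array : String) (r : Int) : Decidable (Pre_advancedArray array r) := by
  unfold Pre_advancedArray; infer_instance

def pvWitness_advancedArray : String × Int := ("ab", 2)

def Spec_advancedArray (array : String) (r : Int) (out : String) : Prop := out = advancedArray_alt array r
instance (array : String) (r : Int) (out : String) : Decidable (Spec_advancedArray array r out) := by unfold Spec_advancedArray; infer_instance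

-- ===== CLAIM (what is proved, stated in full; the proofs are below) =====
def Claim_equal_advancedArray : Prop := ∀ (array : String) (r : Int), Dom_advancedArray array r → Pre_advancedArray array r → Spec_advancedArray array r (advancedArray array r)

-- ===== LEMMAS AND PROOFS =====

-- proof-only: the character both programs put at 1-based position i
def pvCell (array : String) (i : Int) : Char :=
  if i = 2 ^ (Nat.size i.toNat - 1) then '0'
  else (PySem.Str.pyGet? array (i - 1 - (Nat.size i.toNat : Int))).getD ' '

-- t+1 is the power of two A's counter j = size t is waiting for  ↔  t+1 is a power of two
lemma pow_cond_iff (t : Nat) :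
    (t + 1 = 2 ^ Nat.size t) ↔ (t + 1 = 2 ^ (Nat.size (t + 1) - 1)) := by
  constructor
  · intro h
    have hs : Nat.size (t + 1) = Nat.size t + 1 := by rw [h, Nat.size_pow]
    simpa [hs] using h
  · intro h
    have h1 : Nat.size t ≤ Nat.size (t + 1) - 1 := by
      rw [Nat.size_le, ← h]; omega
    have h2 : Nat.size (t + 1) - 1 ≤ Nat.size t := by
      have := Nat.lt_size_self t
      have : (2 : Nat) ^ (Nat.size (t + 1) - 1) ≤ 2 ^ Nat.size t := by omega
      exact (Nat.pow_le_pow_iff_right (by norm_num)).mp this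
    rw [h]; congr 1; omega

lemma size_succ_of_pow (t : Nat) (h : t + 1 = 2 ^ Nat.size t) :
    Nat.size (t + 1) = Nat.size t + 1 := by rw [h, Nat.size_pow]

lemma size_succ_of_not_pow (t : Nat) (h : ¬ t + 1 = 2 ^ Nat.size t) :
    Nat.size (t + 1) = Nat.size t := by
  have hle : Nat.size t ≤ Nat.size (t + 1) := Nat.size_le_size (by omega)
  have := Nat.lt_size_self t
  have : Nat.size (t + 1) ≤ Nat.size t := by rw [Nat.size_le]; omega
  omega

lemma size_le_self (t : Nat) : Nat.size t ≤ t := by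
  rw [Nat.size_le]; exact Nat.lt_two_pow_self

-- A-side invariant: after processing 1..t, A's state is (size t, t - size t, cells 1..t)
lemma foldA_eq (array : String) (t : Nat) :
    (PySem.List.pyRange 1 ((t : Int) + 1) 1).foldl (aStep array) (0, 0, []) =
    ((Nat.size t : Int), ((t - Nat.size t : Nat) : Int),
      (PySem.List.pyRange 1 ((t : Int) + 1) 1).map (pvCell array)) := by
  induction t with
  | zero => simp [PySem.List.pyRange_one_eq_nil (by norm_num : (1:Int) ≤ 1)]
  | succ t ih =>
    have hsplit : PySem.List.pyRange 1 ((↑(t + 1) : Int) + 1) 1 =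
        PySem.List.pyRange 1 ((t : Int) + 1) 1 ++ [(t : Int) + 1] := by
      have := PySem.List.pyRange_one_succ_right (a := 1) (b := (t : Int) + 1) (by omega)
      push_cast
      simpa using this
    rw [hsplit, List.foldl_append, List.map_append, ih]
    have htn : (((t : Int) + 1)).toNat = t + 1 := by omega
    have hst : Nat.size t ≤ t := size_le_self t
    by_cases hp : t + 1 = 2 ^ Nat.size t
    · have hs := size_succ_of_pow t hp
      have hA : ((t : Int) + 1) = 2 ^ ((Nat.size t : Int)).toNat := by
        rw [Int.toNat_natCast]; exact_mod_cast hp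
      have hB : ((t : Int) + 1) = 2 ^ (Nat.size ((((t : Int) + 1)).toNat) - 1) := by
        rw [htn, ← Nat.cast_one, ← Nat.cast_add]
        exact_mod_cast (pow_cond_iff t).mp hp
      simp only [List.foldl_cons, List.foldl_nil, List.map_cons, List.map_nil, aStep, pvCell]
      rw [if_pos hA, if_pos hB, hs]
      simp only [Prod.mk.injEq]
      exact ⟨by push_cast; ring, by congr 1; omega, trivial⟩
    · have hs := size_succ_of_not_pow t hp
      have hA : ¬ ((t : Int) + 1) = 2 ^ ((Nat.size t : Int)).toNat := by
        rw [Int.toNat_natCast]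
        intro h; exact hp (by exact_mod_cast h)
      have hB : ¬ ((t : Int) + 1) = 2 ^ (Nat.size ((((t : Int) + 1)).toNat) - 1) := by
        rw [htn]
        intro h
        exact hp ((pow_cond_iff t).mpr (by exact_mod_cast h))
      simp only [List.foldl_cons, List.foldl_nil, List.map_cons, List.map_nil, aStep, pvCell]
      rw [if_neg hA, if_neg hB, htn, hs]
      have hidx : ((t : Int) + 1 - 1 - (Nat.size t : Int)) = ((t - Nat.size t : Nat) : Int) := by
        push_cast [Nat.cast_sub hst]; omega
      rw [hidx]
      simp only [Prod.mk.injEq]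
      exact ⟨trivial, by push_cast [Nat.cast_sub hst, Nat.cast_sub (by omega : Nat.size t ≤ t + 1)]; omega, trivial⟩

-- proof-only: the cell content after the zero-placement pass, 0-based index i
def pvZ (i : Nat) : Option Char :=
  if i + 1 = 2 ^ (Nat.size (i + 1) - 1) then some '0' else none

lemma placeZeros_length (n : Nat) (cells : List (Option Char)) (p : Nat) :
    (placeZeros n cells p).length = cells.length := by
  fun_induction placeZeros with
  | case1 cells p h ih => rw [ih]; simp
  | case2 => rfl

-- characterization of the doubling pass: index i receives '0' iff i+1 is a power of two ≥ p
lemma placeZeros_get (n : Nat) (cells : List (Option Char)) (p : Nat)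
    (hlen : cells.length = n) (hpow : p = 2 ^ (Nat.size p - 1)) (i : Nat) (hi : i < n) :
    (placeZeros n cells p)[i]? =
      if i + 1 = 2 ^ (Nat.size (i + 1) - 1) ∧ p ≤ i + 1 then some (some '0') else cells[i]? := by
  fun_induction placeZeros with
  | case1 cells p h ih =>
    have hp1 : 0 < p := h.1
    have hpn : p ≤ n := h.2
    have hps : p * 2 = 2 ^ (Nat.size p - 1 + 1) := by
      conv_lhs => rw [hpow]
      rw [pow_succ]
    have hpow2 : p * 2 = 2 ^ (Nat.size (p * 2) - 1) := by
      rw [hps, Nat.size_pow]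
      norm_num
    rw [ih (by simpa using hlen) hpow2]
    by_cases hip : i + 1 = p
    · have hcond : i + 1 = 2 ^ (Nat.size (i + 1) - 1) ∧ p ≤ i + 1 := ⟨by rw [hip]; exact hpow, by omega⟩
      rw [if_neg (by omega), if_pos hcond]
      have hieq : i = p - 1 := by omega
      rw [hieq, List.getElem?_set_self (by omega)]
    · rw [List.getElem?_set_ne (by omega)]
      congr 1
      simp only [eq_iff_iff, and_congr_right_iff]
      intro hpowi
      constructor
      · intro h2; omega
      · intro hle
        -- i+1 and p are both powers of two, i+1 ≥ p, i+1 ≠ p ⇒ i+1 ≥ 2p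
        have hx : 2 ^ (Nat.size p - 1) < 2 ^ (Nat.size (i + 1) - 1) := by omega
        have hlt : Nat.size p - 1 < Nat.size (i + 1) - 1 :=
          (Nat.pow_lt_pow_iff_right (by norm_num)).mp hx
        have hy : 2 ^ (Nat.size p - 1 + 1) ≤ 2 ^ (Nat.size (i + 1) - 1) :=
          Nat.pow_le_pow_right (by norm_num) (by omega)
        calc p * 2 = 2 ^ (Nat.size p - 1 + 1) := hps
          _ ≤ 2 ^ (Nat.size (i + 1) - 1) := hy
          _ = i + 1 := hpowi.symm
  | case2 cells p h =>
    have hp1 : 0 < p := by rw [hpow]; positivity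
    rw [if_neg (by omega)]

-- the zero pass on the fresh cell buffer produces exactly the pvZ pattern
lemma placeZeros_eq_map (n : Nat) :
    placeZeros n (List.replicate n none) 1 = (List.range' 1 n).map (fun i => pvZ (i - 1)) := by
  apply List.ext_getElem?
  intro i
  by_cases hi : i < n
  · rw [placeZeros_get n _ 1 (by simp) (by simp) i hi,
        List.getElem?_map, List.getElem?_range' (by simpa using hi)]
    simp only [Option.map_some]
    have h0 : 1 + 1 * i - 1 = i := by omega
    rw [h0]
    unfold pvZ
    by_cases hp : i + 1 = 2 ^ (Nat.size (i + 1) - 1)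
    · rw [if_pos ⟨hp, by omega⟩, if_pos hp]
    · rw [if_neg (by tauto), if_neg hp, List.getElem?_replicate, if_pos hi]
  · have h1 : (placeZeros n (List.replicate n none) 1).length ≤ i := by
      rw [placeZeros_length]; simp; omega
    have h2 : ((List.range' 1 n).map (fun i => pvZ (i - 1))).length ≤ i := by simp; omega
    rw [List.getElem?_eq_none h1, List.getElem?_eq_none h2]

-- fill pass + join on the pvZ pattern yields the pvCell sequence; k = s - size s
-- proof-only Nat form of pvCell
def pvCellN (array : String) (i : Nat) : Char := pvCell array (i : Int)

lemma fill_map (array : String) (len s : Nat) :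
    joinCells (fillCells array ((s - Nat.size s : Nat) : Int)
      ((List.range' (s + 1) len).map (fun i => pvZ (i - 1)))) =
    (List.range' (s + 1) len).map (pvCellN array) := by
  induction len generalizing s with
  | zero => simp [joinCells, fillCells]
  | succ len ih =>
    rw [List.range'_succ]
    simp only [List.map_cons]
    have hz : pvZ (s + 1 - 1) = pvZ s := by norm_num
    have hst : Nat.size s ≤ s := size_le_self s
    have hcell : pvCellN array (s + 1) =
        if s + 1 = 2 ^ (Nat.size (s + 1) - 1) then '0'
        else (PySem.Str.pyGet? array (((s - Nat.size s : Nat) : Nat) : Int)).getD ' ' := by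
      unfold pvCellN pvCell
      have ht : (((s + 1 : Nat) : Int)).toNat = s + 1 := by omega
      rw [ht]
      by_cases hp : s + 1 = 2 ^ (Nat.size (s + 1) - 1)
      · rw [if_pos (by exact_mod_cast hp), if_pos hp]
      · rw [if_neg (by intro h; exact hp (by exact_mod_cast h)), if_neg hp]
        have hs : Nat.size (s + 1) = Nat.size s :=
          size_succ_of_not_pow s (fun h => hp ((pow_cond_iff s).mp h))
        congr 1
        rw [hs]
        push_cast [Nat.cast_sub hst]
        ring
    have htail := ih (s + 1)
    unfold joinCells at htail ⊢
    by_cases hp : s + 1 = 2 ^ (Nat.size (s + 1) - 1)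
    · have hsz : Nat.size (s + 1) = Nat.size s + 1 :=
        size_succ_of_pow s ((pow_cond_iff s).mpr hp)
      have hk : ((s - Nat.size s : Nat) : Int) = ((s + 1 - Nat.size (s + 1) : Nat) : Int) := by
        rw [hsz]; congr 1; omega
      have hzv : pvZ s = some '0' := by unfold pvZ; rw [if_pos hp]
      rw [hz, hzv]
      simp only [fillCells, List.map_cons]
      rw [hk, htail, hcell, if_pos hp]
      rfl
    · have hsz : Nat.size (s + 1) = Nat.size s :=
        size_succ_of_not_pow s (fun h => hp ((pow_cond_iff s).mp h))
      have hk : ((s - Nat.size s : Nat) : Int) + 1 = ((s + 1 - Nat.size (s + 1) : Nat) : Int) := by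
        rw [hsz]
        push_cast [Nat.cast_sub hst, Nat.cast_sub (by omega : Nat.size s ≤ s + 1)]
        omega
      have hzv : pvZ s = none := by unfold pvZ; rw [if_neg hp]
      rw [hz, hzv]
      simp only [fillCells, List.map_cons]
      rw [hk, htail, hcell, if_neg hp]
      rfl

-- pyRange 1 (n+1) 1 is range' 1 n cast to Int
lemma pyRange_eq_range' (n : Nat) :
    PySem.List.pyRange 1 ((n : Int) + 1) 1 = (List.range' 1 n).map Int.ofNat := by
  induction n with
  | zero => simp [PySem.List.pyRange_one_eq_nil (by norm_num : (1:Int) ≤ 1)]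
  | succ n ih =>
    have := PySem.List.pyRange_one_succ_right (a := 1) (b := (n : Int) + 1) (by omega)
    rw [show ((n + 1 : Nat) : Int) + 1 = (n : Int) + 1 + 1 by push_cast; ring, this, ih,
        List.range'_1_concat]
    simp
    omega

-- ===== VERDICT (by name: the statement is the Claim_ definition above) =====
theorem advancedArray_spec : Claim_equal_advancedArray := by
  intro array r _ _
  unfold Spec_advancedArray advancedArray advancedArray_alt
  set n : Int := PySem.Str.len array + r with hn
  by_cases hpos : n ≤ 0
  · rw [if_pos hpos, PySem.List.pyRange_one_eq_nil (by omega)]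
    simp
  · rw [if_neg hpos]
    have hnn : n = ((n.toNat : Nat) : Int) := by omega
    rw [hnn, foldA_eq, placeZeros_eq_map, pyRange_eq_range']
    simp only [Int.toNat_natCast]
    have hf := fill_map array n.toNat 0
    simp only [Nat.size_zero, Nat.sub_zero, Nat.cast_zero, Nat.zero_add] at hf
    rw [hf, List.map_map]
    rfl
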